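-- pv_equiv track=rewrite | github.com/sinkyoungdeok/ps | kakao/2022/블라인드/1.py | solution
-- ===== SOURCE A (Python) =====
-- def solution(id_list, report, k):
--     cnt_dict = {}
--     report_dict = {}
--     answer = []
--
--     for id in id_list:
--         cnt_dict[id] = set()
--         report_dict[id] = set()
--
--     for r in report:
--         s,d = r.split()
--
--         cnt_dict[d].add(s)
--         report_dict[s].add(d)
--
--     for id in id_list:
--         ans = 0
--         for r in report_dict[id]:
--             if len(cnt_dict[r]) >= k:
--                 ans+=1
--
--         answer.append(ans)
--
--
--
--     return answer
-- ===== SOURCE B (Python) =====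
-- def solution(id_list, report, k):
--     pairs = [(s, d) for s, d in map(str.split, report)]
--     def reporters(d):
--         return {s for s, t in pairs if t == d}
--     return [len({d for s, d in pairs if s == i and len(reporters(d)) >= k})
--             for i in id_list]
-- ===== Notes on version B (the rewrite author's own statement) =====
-- stated objective: alternative
-- what changed: B drops A's incrementally built dicts of sets entirely: it parses the reports once and answers each id by a direct nested-scan set comprehension, recomputing each target's distinct-reporter set on demand instead of maintaining cnt_dict/report_dict.
import Mathlib
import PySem

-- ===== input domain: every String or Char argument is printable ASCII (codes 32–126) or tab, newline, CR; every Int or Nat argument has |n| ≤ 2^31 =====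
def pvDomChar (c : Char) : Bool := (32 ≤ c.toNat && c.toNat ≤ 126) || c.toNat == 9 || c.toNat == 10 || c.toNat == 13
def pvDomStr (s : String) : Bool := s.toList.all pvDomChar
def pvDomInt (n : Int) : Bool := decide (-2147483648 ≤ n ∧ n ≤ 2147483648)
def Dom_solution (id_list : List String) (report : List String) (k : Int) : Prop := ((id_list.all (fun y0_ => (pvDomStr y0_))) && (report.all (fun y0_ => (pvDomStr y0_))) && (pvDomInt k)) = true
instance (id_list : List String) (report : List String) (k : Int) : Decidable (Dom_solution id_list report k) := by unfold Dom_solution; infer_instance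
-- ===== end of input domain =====

-- B is an alternative decomposition: no incrementally maintained dicts of sets — it parses the
-- reports once and computes each answer by direct nested-scan set comprehensions.

-- ===== PORT A =====
-- shared parse of one report string, Python's tuple of r.split() / 's, d = r.split()' (both
-- Pythons unpack every report into two tokens): some (s, d) when r splits into exactly two
-- tokens, none where Python raises ValueError (such inputs are excluded by Pre_solution).
def pvSplit2? (r : String) : Option (String × String) :=
  match PySem.Str.split₀ r with
  | [s, d] => some (s, d)
  | _ => none

-- A's cnt_dict[d].add(s) / report_dict[s].add(d) raise KeyError when the key is absent; the port
-- uses Dict.modify with default ∅ there — Pre_solution excludes exactly those inputs.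
def solution (id_list : List String) (report : List String) (k : Int) : List Int :=
  let init : PySem.Dict String (PySem.Set String) × PySem.Dict String (PySem.Set String) :=
    id_list.foldl (fun st id => (st.1.insert id PySem.Set.empty, st.2.insert id PySem.Set.empty))
      (PySem.Dict.empty, PySem.Dict.empty)
  let st := report.foldl (fun st r =>
    (pvSplit2? r).elim st (fun sd =>
      (st.1.modify sd.2 PySem.Set.empty (fun t => PySem.Set.add t sd.1),
       st.2.modify sd.1 PySem.Set.empty (fun t => PySem.Set.add t sd.2)))) init
  id_list.foldl (fun answer id =>
    answer ++ [(st.2.getD id PySem.Set.empty).foldl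
      (fun ans r => if k ≤ (PySem.Set.len (st.1.getD r PySem.Set.empty) : Int) then ans + 1 else ans) 0]) []

-- ===== PORT B =====
-- Source B's '[(s, d) for s, d in map(str.split, report)]' raises ValueError on a report that does
-- not split into exactly two tokens (Pre_solution excludes those inputs); the port keeps the
-- 2-token parses via filterMap, exact wherever Source B returns.
def solution_alt (id_list : List String) (report : List String) (k : Int) : List Int :=
  let pairs : List (String × String) := report.filterMap pvSplit2?
  let reporters : String → PySem.Set String :=
    fun d => PySem.Set.ofList ((pairs.filter (fun p => p.2 == d)).map (fun p => p.1))
  id_list.map (fun i =>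
    PySem.Set.len (PySem.Set.ofList ((pairs.filter (fun p =>
      p.1 == i && decide (k ≤ PySem.Set.len (reporters p.2)))).map (fun p => p.2))))

-- ===== PRECONDITION & SPEC =====
-- Pre_ excludes exactly the inputs where Python A raises: a report that does not split into two
-- tokens (ValueError at unpacking, B raises there too) or one that mentions an id outside
-- id_list (KeyError).
def Pre_solution (id_list : List String) (report : List String) (k : Int) : Prop :=
  (report.all (fun r =>
    ((pvSplit2? r).map (fun sd => id_list.contains sd.1 && id_list.contains sd.2)).getD false)) = true

instance (id_list : List String) (report : List String) (k : Int) : Decidable (Pre_solution id_list report k) := by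
  unfold Pre_solution; infer_instance

def pvWitness_solution : List String × List String × Int := (["muzi", "frodo"], ["muzi frodo", "frodo muzi", "muzi frodo"], 1)

def Spec_solution (id_list : List String) (report : List String) (k : Int) (out : List Int) : Prop := out = solution_alt id_list report k
instance (id_list : List String) (report : List String) (k : Int) (out : List Int) : Decidable (Spec_solution id_list report k out) := by unfold Spec_solution; infer_instance

-- ===== CLAIM (what is proved, stated in full; the proofs are below) =====
def Claim_equal_solution : Prop := ∀ (id_list : List String) (report : List String) (k : Int), Dom_solution id_list report k → Pre_solution id_list report k → Spec_solution id_list report k (solution id_list report k)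

-- ===== LEMMAS AND PROOFS =====

-- A's report loop: membership in the cnt_dict set of a target d
lemma pvA_cnt_mem (l : List String)
    (crd : PySem.Dict String (PySem.Set String) × PySem.Dict String (PySem.Set String))
    (x d : String) :
    x ∈ ((l.foldl (fun st r =>
      (pvSplit2? r).elim st (fun sd =>
        (st.1.modify sd.2 PySem.Set.empty (fun t => PySem.Set.add t sd.1),
         st.2.modify sd.1 PySem.Set.empty (fun t => PySem.Set.add t sd.2)))) crd).1.getD d PySem.Set.empty)
    ↔ x ∈ crd.1.getD d PySem.Set.empty ∨ (x, d) ∈ l.filterMap pvSplit2? := by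
  induction l generalizing crd with
  | nil => simp
  | cons r t ih =>
    simp only [List.foldl_cons, List.filterMap_cons]
    cases h : pvSplit2? r with
    | none => simp only [h, Option.elim_none, Option.elim_some]; rw [ih]
    | some sd =>
      simp only [h, Option.elim_none, Option.elim_some]
      rw [ih, PySem.Dict.getD_modify]
      by_cases hd : d = sd.2
      · subst hd; simp [PySem.Set.mem_add, Prod.ext_iff]; tauto
      · simp [hd, Prod.ext_iff]

-- A's report loop: membership in the report_dict set of a source s
lemma pvA_rd_mem (l : List String)
    (crd : PySem.Dict String (PySem.Set String) × PySem.Dict String (PySem.Set String))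
    (s y : String) :
    y ∈ ((l.foldl (fun st r =>
      (pvSplit2? r).elim st (fun sd =>
        (st.1.modify sd.2 PySem.Set.empty (fun t => PySem.Set.add t sd.1),
         st.2.modify sd.1 PySem.Set.empty (fun t => PySem.Set.add t sd.2)))) crd).2.getD s PySem.Set.empty)
    ↔ y ∈ crd.2.getD s PySem.Set.empty ∨ (s, y) ∈ l.filterMap pvSplit2? := by
  induction l generalizing crd with
  | nil => simp
  | cons r t ih =>
    simp only [List.foldl_cons, List.filterMap_cons]
    cases h : pvSplit2? r with
    | none => simp only [h, Option.elim_none, Option.elim_some]; rw [ih]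
    | some sd =>
      simp only [h, Option.elim_none, Option.elim_some]
      rw [ih, PySem.Dict.getD_modify]
      by_cases hs : s = sd.1
      · subst hs; simp [PySem.Set.mem_add, Prod.ext_iff]; tauto
      · simp [hs, Prod.ext_iff]

-- A's report loop keeps every stored set duplicate-free
lemma pvA_nodup (l : List String)
    (crd : PySem.Dict String (PySem.Set String) × PySem.Dict String (PySem.Set String))
    (hc : ∀ d, (crd.1.getD d PySem.Set.empty).Nodup)
    (hrd : ∀ s, (crd.2.getD s PySem.Set.empty).Nodup) :
    (∀ d, (((l.foldl (fun st r =>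
      (pvSplit2? r).elim st (fun sd =>
        (st.1.modify sd.2 PySem.Set.empty (fun t => PySem.Set.add t sd.1),
         st.2.modify sd.1 PySem.Set.empty (fun t => PySem.Set.add t sd.2)))) crd)).1.getD d PySem.Set.empty).Nodup) ∧
    (∀ s, (((l.foldl (fun st r =>
      (pvSplit2? r).elim st (fun sd =>
        (st.1.modify sd.2 PySem.Set.empty (fun t => PySem.Set.add t sd.1),
         st.2.modify sd.1 PySem.Set.empty (fun t => PySem.Set.add t sd.2)))) crd)).2.getD s PySem.Set.empty).Nodup) := by
  induction l generalizing crd with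
  | nil => exact ⟨hc, hrd⟩
  | cons r t ih =>
    simp only [List.foldl_cons]
    cases h : pvSplit2? r with
    | none => simp only [h, Option.elim_none, Option.elim_some]; exact ih crd hc hrd
    | some sd =>
      simp only [h, Option.elim_none, Option.elim_some]
      refine ih _ (fun d => ?_) (fun s => ?_)
      · rw [PySem.Dict.getD_modify]
        split_ifs with hd
        · exact PySem.Set.nodup_add _ _ (hc sd.2)
        · exact hc d
      · rw [PySem.Dict.getD_modify]
        split_ifs with hs
        · exact PySem.Set.nodup_add _ _ (hrd sd.1)
        · exact hrd s

-- A's id_list initialisation leaves every lookup-with-default-∅ at ∅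
lemma pvA_init_getD (l : List String)
    (crd : PySem.Dict String (PySem.Set String) × PySem.Dict String (PySem.Set String))
    (hc : ∀ d, crd.1.getD d PySem.Set.empty = PySem.Set.empty)
    (hrd : ∀ s, crd.2.getD s PySem.Set.empty = PySem.Set.empty) :
    (∀ d, ((l.foldl (fun st id => (st.1.insert id PySem.Set.empty, st.2.insert id PySem.Set.empty))
        crd).1.getD d PySem.Set.empty = PySem.Set.empty)) ∧
    (∀ s, ((l.foldl (fun st id => (st.1.insert id PySem.Set.empty, st.2.insert id PySem.Set.empty))
        crd).2.getD s PySem.Set.empty = PySem.Set.empty)) := by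
  induction l generalizing crd with
  | nil => exact ⟨hc, hrd⟩
  | cons i t ih =>
    simp only [List.foldl_cons]
    refine ih _ (fun d => ?_) (fun s => ?_)
    · rw [PySem.Dict.getD_insert]; split_ifs with hd
      · rfl
      · exact hc d
    · rw [PySem.Dict.getD_insert]; split_ifs with hs
      · rfl
      · exact hrd s

-- projections of a filtered pair list: membership
lemma pvMem_map_fst (E : List (String × String)) (d x : String) :
    x ∈ (E.filter (fun p => p.2 == d)).map (fun p => p.1) ↔ (x, d) ∈ E := by
  constructor
  · intro hx
    rcases List.mem_map.mp hx with ⟨p, hp, rfl⟩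
    have h2 : p.2 = d := by simpa using (List.mem_filter.mp hp).2
    have : p = (p.1, d) := by rw [← h2]
    rw [← this]; exact (List.mem_filter.mp hp).1
  · intro hx
    exact List.mem_map.mpr ⟨(x, d), List.mem_filter.mpr ⟨hx, by simp⟩, rfl⟩

-- membership in B's answer list for id i: d with (i, d) an edge whose test holds
lemma pvMem_map_snd_filter (E : List (String × String)) (i d : String) (t : String → Bool) :
    d ∈ (E.filter (fun p => p.1 == i && t p.2)).map (fun p => p.2) ↔ ((i, d) ∈ E ∧ t d = true) := by
  constructor
  · intro hd
    rcases List.mem_map.mp hd with ⟨p, hp, rfl⟩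
    have h := (List.mem_filter.mp hp).2
    simp only [Bool.and_eq_true, beq_iff_eq] at h
    have : p = (i, p.2) := by rw [← h.1]
    exact ⟨this ▸ (List.mem_filter.mp hp).1, h.2⟩
  · intro ⟨hmem, ht⟩
    exact List.mem_map.mpr ⟨(i, d), List.mem_filter.mpr ⟨hmem, by simp [ht]⟩, rfl⟩

-- two duplicate-free lists with the same members have the same length
lemma pvLen_eq_of_mem_iff {α : Type} [DecidableEq α] (S T : List α) (hS : S.Nodup) (hT : T.Nodup)
    (hmem : ∀ x, x ∈ S ↔ x ∈ T) : S.length = T.length :=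
  ((List.perm_ext_iff_of_nodup hS hT).2 hmem).length_eq

-- the two ports agree on every input satisfying Pre_solution (in fact unconditionally)
lemma pvPorts_eq (id_list report : List String) (k : Int) :
    solution id_list report k = solution_alt id_list report k := by
  simp only [solution, solution_alt]
  rw [PySem.List.foldl_append_singleton_eq_map, List.nil_append]
  apply List.map_congr_left
  intro id hid
  rw [PySem.List.foldl_ite_add_one]
  set P : List (String × String) := report.filterMap pvSplit2? with hP
  set init := id_list.foldl
    (fun st id => (st.1.insert id PySem.Set.empty, st.2.insert id PySem.Set.empty))
    ((PySem.Dict.empty, PySem.Dict.empty) :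
      PySem.Dict String (PySem.Set String) × PySem.Dict String (PySem.Set String)) with hinit0
  set stA := report.foldl (fun st r =>
    (pvSplit2? r).elim st (fun sd =>
      (st.1.modify sd.2 PySem.Set.empty (fun t => PySem.Set.add t sd.1),
       st.2.modify sd.1 PySem.Set.empty (fun t => PySem.Set.add t sd.2)))) init with hstA0
  -- facts about A's state
  have h1 := pvA_init_getD id_list
    ((PySem.Dict.empty, PySem.Dict.empty) :
      PySem.Dict String (PySem.Set String) × PySem.Dict String (PySem.Set String))
    (fun d => PySem.Dict.getD_empty _ _) (fun s => PySem.Dict.getD_empty _ _)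
  rw [← hinit0] at h1
  have hnod := pvA_nodup report init (fun d => by rw [h1.1 d]; exact List.nodup_nil)
    (fun s => by rw [h1.2 s]; exact List.nodup_nil)
  rw [← hstA0] at hnod
  have hSmem : ∀ y, y ∈ stA.2.getD id PySem.Set.empty ↔ (id, y) ∈ P := by
    intro y
    have h := pvA_rd_mem report init id y
    rw [← hstA0] at h
    exact h.trans (by rw [h1.2 id, hP]; simp only [show (PySem.Set.empty : PySem.Set String) = [] from rfl, List.not_mem_nil, false_or])
  have hCmem : ∀ d x, x ∈ stA.1.getD d PySem.Set.empty ↔ (x, d) ∈ P := by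
    intro d x
    have h := pvA_cnt_mem report init x d
    rw [← hstA0] at h
    exact h.trans (by rw [h1.1 d, hP]; simp only [show (PySem.Set.empty : PySem.Set String) = [] from rfl, List.not_mem_nil, false_or])
  -- A's cnt_dict set of a target y has the same size as B's on-demand reporters(y) set
  have hlen : ∀ y, PySem.Set.len (stA.1.getD y PySem.Set.empty)
      = PySem.Set.len (PySem.Set.ofList ((P.filter (fun p => p.2 == y)).map (fun p => p.1))) := by
    intro y
    have := pvLen_eq_of_mem_iff (stA.1.getD y PySem.Set.empty)
      (PySem.Set.ofList ((P.filter (fun p => p.2 == y)).map (fun p => p.1)))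
      (hnod.1 y) (PySem.Set.nodup_ofList _)
      (fun x => (hCmem y x).trans
        (((PySem.Set.mem_ofList _ x).trans (pvMem_map_fst P y x)).symm))
    show ((stA.1.getD y PySem.Set.empty).length : Int) = _
    rw [this]; rfl
  -- the per-target tests agree
  have hq : ∀ y, (decide (k ≤ PySem.Set.len (stA.1.getD y PySem.Set.empty)))
      = (decide (k ≤ PySem.Set.len (PySem.Set.ofList
          ((P.filter (fun p => p.2 == y)).map (fun p => p.1))))) := by
    intro y; rw [hlen y]
  -- central count equality: A's countP over its stored set = B's set comprehension size
  have key : (stA.2.getD id PySem.Set.empty).countP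
        (fun y => decide (k ≤ PySem.Set.len (stA.1.getD y PySem.Set.empty)))
      = (PySem.Set.ofList ((P.filter (fun p =>
          p.1 == id && decide (k ≤ PySem.Set.len (PySem.Set.ofList
            ((P.filter (fun q => q.2 == p.2)).map (fun q => q.1)))))).map (fun p => p.2))).length := by
    set t : String → Bool := fun y => decide (k ≤ PySem.Set.len (PySem.Set.ofList
      ((P.filter (fun q => q.2 == y)).map (fun q => q.1)))) with ht
    rw [List.countP_congr (fun y _ => by rw [hq y]), List.countP_eq_length_filter]
    refine pvLen_eq_of_mem_iff _ _ ((hnod.2 id).filter _) (PySem.Set.nodup_ofList _) ?_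
    intro y
    rw [List.mem_filter, hSmem y, PySem.Set.mem_ofList,
      pvMem_map_snd_filter P id y t]
  calc (0 : Int) + ((stA.2.getD id PySem.Set.empty).countP
        (fun y => decide (k ≤ PySem.Set.len (stA.1.getD y PySem.Set.empty))) : Int)
      = ((stA.2.getD id PySem.Set.empty).countP
        (fun y => decide (k ≤ PySem.Set.len (stA.1.getD y PySem.Set.empty))) : Int) := by ring
    _ = _ := by rw [key]; rfl

-- ===== VERDICT (by name: the statements are the Claim_ definitions above) =====
theorem solution_spec : Claim_equal_solution := by
  intro id_list report k _ _
  unfold Spec_solution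
  exact pvPorts_eq id_list report k
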